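-- pv_equiv track=rewrite | github.com/siyansusan/AHAB | Tracer.py | getMinAlignability
-- ===== SOURCE A (Python) =====
-- def getMinAlignability(A):
--     """
--     Find the minimum alignability.
--     """
--     a = []
--     for x in A:
--         if x is not None:
--             a.append(x)
--     if len(a) > 0:
--         return min(a)
--     return 0
-- ===== SOURCE B (Python) =====
-- def getMinAlignability(A):
--     """
--     Find the minimum alignability (single pass, running accumulator).
--     """
--     best = None
--     for x in A:
--         if x is not None:
--             if best is None or x < best:
--                 best = x
--     return best if best is not None else 0
-- ===== Notes on version B (the rewrite author's own statement) =====
-- stated objective: simpler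
-- what changed: Replaces build-a-filtered-list-then-call-min with a single pass keeping a running Optional minimum, so no intermediate list is materialized and min() is never called.
import Mathlib
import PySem

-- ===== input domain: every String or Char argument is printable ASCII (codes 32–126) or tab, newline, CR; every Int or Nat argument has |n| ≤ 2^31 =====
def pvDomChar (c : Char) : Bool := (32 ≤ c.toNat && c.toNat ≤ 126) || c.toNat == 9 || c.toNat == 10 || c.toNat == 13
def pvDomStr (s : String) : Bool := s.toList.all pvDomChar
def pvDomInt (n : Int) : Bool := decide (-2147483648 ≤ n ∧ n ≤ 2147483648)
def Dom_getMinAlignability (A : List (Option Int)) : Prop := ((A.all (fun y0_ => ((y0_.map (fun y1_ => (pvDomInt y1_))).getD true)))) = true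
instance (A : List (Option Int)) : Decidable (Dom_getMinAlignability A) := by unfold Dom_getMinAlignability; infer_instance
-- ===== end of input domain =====

-- B replaces A's filter-into-a-list-then-min decomposition by a single pass with a running
-- Optional minimum (objective: simpler — no intermediate list, no call to min).

-- ===== PORT A =====
-- a = []; for x in A: if x is not None: a.append(x); then min(a) if nonempty else 0
def getMinAlignability (A : List (Option Int)) : Int :=
  let a := A.foldl (fun acc x => match x with | some v => acc ++ [v] | none => acc) []
  if a.length > 0 then (PySem.List.min? a (fun y => y)).getD 0 else 0

-- ===== PORT B =====
-- best = None; for x in A: if x is not None and (best is None or x < best): best = x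
def altGo (best : Option Int) : List (Option Int) → Option Int
  | [] => best
  | x :: t =>
    altGo (match x with
           | none => best
           | some v => match best with
                       | none => some v
                       | some b => if v < b then some v else some b) t

def getMinAlignability_alt (A : List (Option Int)) : Int :=
  (altGo none A).getD 0

-- ===== PRECONDITION & SPEC =====
def Spec_getMinAlignability (A : List (Option Int)) (out : Int) : Prop := out = getMinAlignability_alt A
instance (A : List (Option Int)) (out : Int) : Decidable (Spec_getMinAlignability A out) := by unfold Spec_getMinAlignability; infer_instance

-- ===== CLAIM (what is proved, stated in full; the proofs are below) =====
def Claim_equal_getMinAlignability : Prop := ∀ (A : List (Option Int)), Dom_getMinAlignability A → Spec_getMinAlignability A (getMinAlignability A)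

-- ===== LEMMAS AND PROOFS =====

theorem pvFoldA_eq (A : List (Option Int)) (acc : List Int) :
    A.foldl (fun acc x => match x with | some v => acc ++ [v] | none => acc) acc
      = acc ++ A.filterMap id := by
  induction A generalizing acc with
  | nil => simp [List.foldl]
  | cons x t ih =>
    cases x <;> simp [List.foldl, ih]

theorem pvAltGo_some (A : List (Option Int)) (b : Int) :
    altGo (some b) A = some ((A.filterMap id).foldl min b) := by
  induction A generalizing b with
  | nil => simp [altGo]
  | cons x t ih =>
    cases x with
    | none => simpa [altGo, List.filterMap_cons] using ih b
    | some v =>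
      have h2 : (if v < b then some v else some b) = some (min b v) := by
        rw [min_def]; split_ifs with h1 h2 <;> simp <;> omega
      simp [altGo, h2, ih]

theorem pvAltGo_none (A : List (Option Int)) :
    altGo none A = match A.filterMap id with
                   | [] => none
                   | v :: t => some (t.foldl min v) := by
  induction A with
  | nil => simp [altGo]
  | cons x t ih =>
    cases x with
    | none => simpa [altGo, List.filterMap_cons] using ih
    | some v => simp [altGo, pvAltGo_some]

-- ===== VERDICT (by name: the statement is the Claim_ definition above) =====
theorem getMinAlignability_spec : Claim_equal_getMinAlignability := by
  intro A _
  unfold Spec_getMinAlignability getMinAlignability getMinAlignability_alt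
  rw [pvFoldA_eq, pvAltGo_none]
  cases h : A.filterMap id with
  | nil => simp
  | cons v t => simp [PySem.List.min?_id_cons]
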